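-- pv_equiv track=rewrite | github.com/enebin/Aespa | Scripts/update_readme.py | format_snippet
-- ===== SOURCE A (Python) =====
-- def format_snippet(snippet):
--     # Determine the indentation of the first line
--     first_line_indent = len(snippet[0]) - len(snippet[0].lstrip())
--
--     formatted_lines = []
--     previous_line_was_empty = True  # Start assuming the previous line was empty
--
--     for line in snippet:
--         # Remove the common indentation
--         line_content = line[first_line_indent:] if len(line) > first_line_indent else line
--
--         # Check if the line is empty after removing indentation
--         if line_content.strip():
--             formatted_lines.append(line_content.rstrip())
--             previous_line_was_empty = False
--         elif not previous_line_was_empty: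
--             # Add an empty line only if the previous line was not empty
--             formatted_lines.append('')
--             previous_line_was_empty = True
--
--     # Join the lines and strip leading/trailing whitespace
--     return '\n'.join(formatted_lines).strip()
-- ===== SOURCE B (Python) =====
-- def format_snippet(snippet):
--     # Stage 1: map each line to its processed form (strip common indent, rstrip).
--     first_line_indent = len(snippet[0]) - len(snippet[0].lstrip())
--     processed = [
--         (line[first_line_indent:] if len(line) > first_line_indent else line).rstrip()
--         for line in snippet
--     ]
--
--     # Stage 2: group consecutive lines by blankness (groupby-style scan):
--     # a blank run contributes one '' element, a non-blank run is joined as one block.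
--     groups = []
--     i = 0
--     n = len(processed)
--     while i < n:
--         if processed[i] == '':
--             while i < n and processed[i] == '':
--                 i += 1
--             groups.append('')
--         else:
--             j = i
--             while j < n and processed[j] != '':
--                 j += 1
--             groups.append('\n'.join(processed[i:j]))
--             i = j
--
--     # Leading/trailing blank groups disappear under the final strip.
--     return '\n'.join(groups).strip()
-- ===== Notes on version B (the rewrite author's own statement) =====
-- stated objective: idiomatic
-- what changed: Replaces A's single stateful loop with a previous_line_was_empty flag by a two-stage pipeline: a comprehension mapping every line to its de-indented rstripped form, then a groupby-style run scan that emits one '' per blank run and one joined block per non-blank run, leaving leading/trailing blank runs to the final strip.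
import Mathlib
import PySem

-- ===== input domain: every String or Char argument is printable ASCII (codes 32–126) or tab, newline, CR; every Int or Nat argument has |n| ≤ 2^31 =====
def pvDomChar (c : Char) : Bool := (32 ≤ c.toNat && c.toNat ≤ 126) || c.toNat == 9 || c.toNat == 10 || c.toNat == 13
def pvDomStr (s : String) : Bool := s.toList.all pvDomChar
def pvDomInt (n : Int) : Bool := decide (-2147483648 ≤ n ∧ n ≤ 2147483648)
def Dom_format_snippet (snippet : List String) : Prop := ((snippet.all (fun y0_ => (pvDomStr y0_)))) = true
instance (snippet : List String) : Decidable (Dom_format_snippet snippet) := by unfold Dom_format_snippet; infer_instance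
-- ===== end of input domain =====

-- B replaces A's stateful previous_line_was_empty loop by a map stage plus a groupby-style
-- run scan (one '' per blank run, one joined block per non-blank run); same cost, more idiomatic.

-- ===== PORT A =====
def format_snippet (snippet : List String) : String :=
  -- snippet[0]: Pre_ requires snippet ≠ [] (Python raises IndexError on [])
  let first := snippet.headD ""
  let firstLineIndent : Int := PySem.Str.len first - PySem.Str.len (PySem.Str.lstrip first)
  let r := snippet.foldl (fun (st : List String × Bool) line =>
      let lineContent := if PySem.Str.len line > firstLineIndent then
          PySem.Str.slice line (some firstLineIndent) none else line
      if PySem.Str.strip lineContent ≠ "" then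
        (st.1 ++ [PySem.Str.rstrip lineContent], false)
      else if st.2 = false then
        (st.1 ++ [""], true)
      else st) ([], true)
  PySem.Str.strip (PySem.Str.join "\n" r.1)

-- ===== PORT B =====
-- groupby-style run scan over the processed lines (Source B's while loops, as structural recursion):
-- a blank run yields one '' element, a non-blank run is joined into one block.
def collapseGroups : List String → List String
  | [] => []
  | p :: ps =>
    if p = "" then
      "" :: collapseGroups (ps.dropWhile (· == ""))
    else
      PySem.Str.join "\n" (p :: ps.takeWhile (· != "")) :: collapseGroups (ps.dropWhile (· != ""))
termination_by l => l.length
decreasing_by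
  · exact Nat.lt_succ_of_le (List.length_dropWhile_le _ _)
  · exact Nat.lt_succ_of_le (List.length_dropWhile_le _ _)

def format_snippet_alt (snippet : List String) : String :=
  let first := snippet.headD ""
  let firstLineIndent : Int := PySem.Str.len first - PySem.Str.len (PySem.Str.lstrip first)
  let processed := snippet.map (fun line =>
      PySem.Str.rstrip (if PySem.Str.len line > firstLineIndent then
          PySem.Str.slice line (some firstLineIndent) none else line))
  PySem.Str.strip (PySem.Str.join "\n" (collapseGroups processed))

-- ===== PRECONDITION & SPEC =====
-- Pre_ excludes only the empty list, on which Python A raises IndexError (snippet[0]).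
def Pre_format_snippet (snippet : List String) : Prop := snippet ≠ []
instance (snippet : List String) : Decidable (Pre_format_snippet snippet) := by
  unfold Pre_format_snippet; infer_instance
def pvWitness_format_snippet : List String := ["  x"]

def Spec_format_snippet (snippet : List String) (out : String) : Prop := out = format_snippet_alt snippet
instance (snippet : List String) (out : String) : Decidable (Spec_format_snippet snippet out) := by unfold Spec_format_snippet; infer_instance

-- ===== CLAIM (what is proved, stated in full; the proofs are below) =====
def Claim_equal_format_snippet : Prop := ∀ (snippet : List String), Dom_format_snippet snippet → Pre_format_snippet snippet → Spec_format_snippet snippet (format_snippet snippet)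

-- ===== LEMMAS AND PROOFS =====

-- the processed form of one line (both ports compute exactly this per line)
def procL (indent : Int) (line : String) : String :=
  PySem.Str.rstrip (if PySem.Str.len line > indent then
      PySem.Str.slice line (some indent) none else line)

-- the list of lines A's loop accumulates, as a recursion over the processed lines
def aList : Bool → List String → List String
  | _, [] => []
  | true, p :: ps => if p = "" then aList true ps else p :: aList false ps
  | false, p :: ps => if p = "" then "" :: aList true ps else p :: aList false ps

-- A's flag after the loop
def flagAfter : Bool → List String → Bool
  | flag, [] => flag
  | _, p :: ps => if p = "" then flagAfter true ps else flagAfter false ps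

-- join with '\n' at the character level
def J (l : List String) : List Char := PySem.Chars.join ['\n'] (l.map String.toList)

lemma ofList_eq_empty {l : List Char} : (String.ofList l = "") ↔ l = [] := by
  constructor
  · intro h; have := congrArg String.toList h; simpa using this
  · intro h; subst h; rfl

-- a line is blank after .strip() iff it is blank after .rstrip()
lemma strip_empty_iff (s : String) : (PySem.Str.strip s = "") ↔ (PySem.Str.rstrip s = "") := by
  simp only [PySem.Str.strip, PySem.Str.rstrip, ofList_eq_empty]
  unfold PySem.Chars.strip PySem.Chars.rstrip PySem.Chars.lstrip
  simp only [List.reverse_eq_nil_iff, List.dropWhile_eq_nil_iff, List.mem_reverse]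
  constructor
  · intro h x hx
    have hsplit := List.takeWhile_append_dropWhile (p := PySem.Chars.isspace) (l := s.toList)
    rw [← hsplit] at hx
    rcases List.mem_append.mp hx with h1 | h2
    · exact List.mem_takeWhile_imp h1
    · exact h x h2
  · intro h x hx
    exact h x ((List.dropWhile_sublist _).subset hx)

lemma foldA (indent : Int) (l : List String) (acc : List String) (flag : Bool) :
    l.foldl (fun (st : List String × Bool) line =>
      let lineContent := if PySem.Str.len line > indent then
          PySem.Str.slice line (some indent) none else line
      if PySem.Str.strip lineContent ≠ "" then
        (st.1 ++ [PySem.Str.rstrip lineContent], false)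
      else if st.2 = false then
        (st.1 ++ [""], true)
      else st) (acc, flag)
    = (acc ++ aList flag (l.map (procL indent)), flagAfter flag (l.map (procL indent))) := by
  set f : List String × Bool → String → List String × Bool := (fun st line =>
      let lineContent := if PySem.Str.len line > indent then
          PySem.Str.slice line (some indent) none else line
      if PySem.Str.strip lineContent ≠ "" then
        (st.1 ++ [PySem.Str.rstrip lineContent], false)
      else if st.2 = false then
        (st.1 ++ [""], true)
      else st) with hf
  induction l generalizing acc flag with
  | nil => simp [aList, flagAfter]
  | cons line ls ih =>
    rw [List.foldl_cons, List.map_cons]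
    by_cases hs : PySem.Str.strip (if PySem.Str.len line > indent then
        PySem.Str.slice line (some indent) none else line) = ""
    · have hb : procL indent line = "" := (strip_empty_iff _).mp hs
      cases flag with
      | true =>
        have hstep : f (acc, true) line = (acc, true) := by
          rw [hf]; dsimp only
          rw [if_neg (fun hcon => hcon hs), if_neg (by simp)]
        rw [hstep, ih]
        simp [aList, flagAfter, hb]
      | false =>
        have hstep : f (acc, false) line = (acc ++ [""], true) := by
          rw [hf]; dsimp only
          rw [if_neg (fun hcon => hcon hs), if_pos rfl]
        rw [hstep, ih]
        simp [aList, flagAfter, hb]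
    · have hb : procL indent line ≠ "" := fun h => hs ((strip_empty_iff _).mpr h)
      have hstep : f (acc, flag) line = (acc ++ [procL indent line], false) := by
        rw [hf]; dsimp only
        rw [if_pos hs]
        rfl
      rw [hstep, ih]
      cases flag <;> simp [aList, flagAfter, hb]

lemma aList_true_dropWhile (ps : List String) :
    aList true ps = aList false (ps.dropWhile (· == "")) := by
  induction ps with
  | nil => simp [aList]
  | cons p ps ih =>
    by_cases h : p = ""
    · simp [aList, h, ih]
    · simp [aList, h]

lemma aList_false_ne_nil {l : List String} (h : l ≠ []) : aList false l ≠ [] := by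
  cases l with
  | nil => exact absurd rfl h
  | cons p ps => by_cases hp : p = "" <;> simp [aList, hp]

lemma collapse_nil : collapseGroups [] = [] := by simp [collapseGroups]

lemma collapse_eq_nil {l : List String} : collapseGroups l = [] ↔ l = [] := by
  cases l with
  | nil => simp [collapseGroups]
  | cons p ps => by_cases hp : p = "" <;> simp [collapseGroups, hp]

lemma aList_false_append (g rest : List String) (h : ∀ x ∈ g, x ≠ "") :
    aList false (g ++ rest) = g ++ aList false rest := by
  induction g with
  | nil => simp
  | cons x g ih =>
    have hx : x ≠ "" := h x (by simp)
    simp only [List.cons_append, aList, if_neg hx]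
    rw [ih (fun y hy => h y (by simp [hy]))]

lemma J_cons_ne (x : String) {L : List String} (h : L ≠ []) :
    J (x :: L) = x.toList ++ '\n' :: J L := by
  cases L with
  | nil => exact absurd rfl h
  | cons y t => simp [J, PySem.Chars.join_cons_cons]

lemma J_singleton (x : String) : J [x] = x.toList := by
  simp [J, PySem.Chars.join_singleton]

lemma toList_strJoin (l : List String) : (PySem.Str.join "\n" l).toList = J l := by
  have hnl : ("\n" : String).toList = ['\n'] := rfl
  simp [PySem.Str.join, J, String.toList_ofList, hnl]

lemma J_append (g L : List String) (hg : g ≠ []) :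
    J (g ++ L) = if L = [] then J g else J g ++ '\n' :: J L := by
  induction g with
  | nil => exact absurd rfl hg
  | cons x g ih =>
    by_cases hgnil : g = []
    · subst hgnil
      by_cases hL : L = []
      · simp [hL]
      · simp only [List.singleton_append, if_neg hL, J_cons_ne x hL, J_singleton]
    · have hgl : g ++ L ≠ [] := by simp [hgnil]
      rw [List.cons_append, J_cons_ne x hgl, ih hgnil, J_cons_ne x hgnil]
      by_cases hL : L = [] <;> simp [hL]

lemma J_collapse (l : List String) : J (collapseGroups l) = J (aList false l) := by
  induction l using collapseGroups.induct with
  | case1 => rw [collapse_nil]; simp [aList]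
  | case2 ps ih =>
    rw [collapseGroups]
    simp only [if_true]
    have hA : aList false ("" :: ps) = "" :: aList false (ps.dropWhile (· == "")) := by
      simp [aList, aList_true_dropWhile]
    rw [hA]
    by_cases hd : ps.dropWhile (· == "") = []
    · rw [hd, collapse_nil]
      simp [J_singleton, aList]
    · have h1 : collapseGroups (ps.dropWhile (· == "")) ≠ [] := by
        intro h; exact hd (collapse_eq_nil.mp h)
      have h2 : aList false (ps.dropWhile (· == "")) ≠ [] := aList_false_ne_nil hd
      rw [J_cons_ne _ h1, J_cons_ne _ h2, ih]
  | case3 p ps hp ih =>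
    rw [collapseGroups]
    simp only [if_neg hp]
    have hsplit : ps.takeWhile (· != "") ++ ps.dropWhile (· != "") = ps :=
      List.takeWhile_append_dropWhile
    have hg : ∀ x ∈ p :: ps.takeWhile (· != ""), x ≠ "" := by
      intro x hx
      rcases List.mem_cons.mp hx with h | h
      · subst h; exact hp
      · have := List.mem_takeWhile_imp h; simpa using this
    have hA : aList false (p :: ps) =
        (p :: ps.takeWhile (· != "")) ++ aList false (ps.dropWhile (· != "")) := by
      conv_lhs => rw [← hsplit]
      rw [← List.cons_append, aList_false_append _ _ hg]
    rw [hA]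
    by_cases hd : ps.dropWhile (· != "") = []
    · rw [hd, collapse_nil]
      simp only [aList, List.append_nil]
      rw [J_singleton, toList_strJoin]
    · have h1 : collapseGroups (ps.dropWhile (· != "")) ≠ [] := by
        intro h; exact hd (collapse_eq_nil.mp h)
      have h2 : aList false (ps.dropWhile (· != "")) ≠ [] := aList_false_ne_nil hd
      rw [J_cons_ne _ h1, J_append _ _ (by simp), if_neg h2, ih, toList_strJoin]

lemma strJoin_eq (l : List String) : PySem.Str.join "\n" l = String.ofList (J l) := by
  have hnl : ("\n" : String).toList = ['\n'] := rfl
  simp [PySem.Str.join, J, hnl]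

lemma strip_newline (cs : List Char) :
    PySem.Str.strip (String.ofList ('\n' :: cs)) = PySem.Str.strip (String.ofList cs) := by
  have h : PySem.Chars.isspace '\n' = true := by decide
  simp only [PySem.Str.strip, String.toList_ofList]
  unfold PySem.Chars.strip PySem.Chars.lstrip
  rw [List.dropWhile_cons_of_pos h]

lemma main_aux (indent : Int) (snippet : List String) :
    PySem.Str.strip (PySem.Str.join "\n" (snippet.foldl (fun (st : List String × Bool) line =>
      let lineContent := if PySem.Str.len line > indent then
          PySem.Str.slice line (some indent) none else line
      if PySem.Str.strip lineContent ≠ "" then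
        (st.1 ++ [PySem.Str.rstrip lineContent], false)
      else if st.2 = false then
        (st.1 ++ [""], true)
      else st) ([], true)).1)
    = PySem.Str.strip (PySem.Str.join "\n" (collapseGroups (snippet.map (fun line =>
      PySem.Str.rstrip (if PySem.Str.len line > indent then
          PySem.Str.slice line (some indent) none else line))))) := by
  rw [foldA]
  dsimp only
  have hmap : (fun line => PySem.Str.rstrip (if PySem.Str.len line > indent then
      PySem.Str.slice line (some indent) none else line)) = procL indent := rfl
  rw [hmap, List.nil_append]
  generalize snippet.map (procL indent) = P
  rw [strJoin_eq, strJoin_eq, J_collapse]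
  cases P with
  | nil => rfl
  | cons p ps =>
    by_cases hp : p = ""
    · subst hp
      have hT : aList true ("" :: ps) = aList true ps := by simp [aList]
      have hF : aList false ("" :: ps) = "" :: aList true ps := by simp [aList]
      rw [hT, hF]
      cases haL : aList true ps with
      | nil => rfl
      | cons q qs =>
        conv_rhs => rw [J_cons_ne ("" : String) (List.cons_ne_nil q qs)]
        have h0 : ("" : String).toList ++ '\n' :: J (q :: qs) = '\n' :: J (q :: qs) := rfl
        rw [h0, strip_newline]
    · have h : aList true (p :: ps) = aList false (p :: ps) := by simp [aList, hp]
      rw [h]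

-- ===== VERDICT (by name: the statement is the Claim_ definition above) =====
theorem format_snippet_spec : Claim_equal_format_snippet := by
  intro snippet _ _
  unfold Spec_format_snippet format_snippet format_snippet_alt
  exact main_aux _ snippet
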